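-- pv_equiv track=rewrite | github.com/AdamZhouSE/pythonHomework | Code/CodeRecords/2515/60751/268117.py | calculate
-- ===== SOURCE A (Python) =====
-- def sum_(nums):
--     sum = 0
--     for i in nums:
--         sum += int(i)
--     return sum
--
-- def calculate(m,nums):
--     if m==1:
--         return sum_(nums)
--     else:
--         min_=1000
--         for i in range(m-1,len(nums)):
--             if min_>max(calculate(m-1,nums[0:i]),sum_(nums[i:len(nums)])):
--                 min_=max(calculate(m-1,nums[0:i]),sum_(nums[i:len(nums)]))
--     return  min_
-- ===== SOURCE B (Python) =====
-- def calculate(m, nums):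
--     if m < 1:
--         raise ValueError("m must be >= 1")
--     n = len(nums)
--     prefix = [0]
--     for x in nums:
--         prefix.append(prefix[-1] + int(x))
--     if m == 1:
--         return prefix[n]
--     if m > n:
--         return 1000
--     # dp[p] = answer for splitting nums[:p] into k parts (k >= 2 capped at 1000)
--     dp = prefix[:]
--     for k in range(2, m + 1):
--         new = []
--         for p in range(n + 1):
--             best = 1000
--             for i in range(k - 1, p):
--                 cand = max(dp[i], prefix[p] - prefix[i])
--                 if cand < best:
--                     best = cand
--             new.append(best)
--         dp = new
--     return dp[n]
-- ===== Notes on version B (the rewrite author's own statement) =====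
-- stated objective: faster
-- what changed: Replaced A's exponential recursion over list slices (recomputing calculate(m-1, prefix) for every split point) by a bottom-up dynamic program over prefix sums that fills an (m x n) table once, preserving A's 1000 cap for m >= 2.
import Mathlib
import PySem

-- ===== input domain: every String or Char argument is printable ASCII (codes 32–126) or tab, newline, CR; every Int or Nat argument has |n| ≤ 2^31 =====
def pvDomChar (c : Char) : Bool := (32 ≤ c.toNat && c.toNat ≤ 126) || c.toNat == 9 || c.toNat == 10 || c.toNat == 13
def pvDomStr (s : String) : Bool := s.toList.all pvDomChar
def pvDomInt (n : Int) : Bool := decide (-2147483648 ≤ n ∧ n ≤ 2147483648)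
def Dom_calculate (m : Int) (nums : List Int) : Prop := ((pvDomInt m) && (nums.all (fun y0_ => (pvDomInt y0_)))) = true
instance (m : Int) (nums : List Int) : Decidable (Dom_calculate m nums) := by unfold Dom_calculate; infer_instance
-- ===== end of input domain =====

-- B replaces A's exponential recursion over slices by a bottom-up DP over prefix sums
-- (same values, including A's 1000 cap for m >= 2); equivalence is proved for m >= 1.
-- For m <= 0 both Pythons raise (A: RecursionError, B: ValueError); those inputs are outside Pre_.


-- ===== PORT A =====
-- sum_(nums): a running-sum loop (int(i) = i on Int inputs)
def sumA (nums : List Int) : Int := nums.foldl (fun s i => s + i) 0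

-- calculate(m, nums), recursion on m (faithful for m >= 1; Python's recursion for
-- m <= 0 never returns, so the 0 case below is never claimed about — see Pre_)
def calcA : Nat → List Int → Int
  | 0, _ => 1000
  | 1, nums => sumA nums
  | (k+2), nums =>
      (PySem.List.pyRange ((k : Int) + 1) (nums.length : Int) 1).foldl
        (fun min_ i =>
          if min_ > max (calcA (k+1) (PySem.List.slice nums (some 0) (some i)))
                        (sumA (PySem.List.slice nums (some i) (some (nums.length : Int)))) then
            max (calcA (k+1) (PySem.List.slice nums (some 0) (some i)))
                (sumA (PySem.List.slice nums (some i) (some (nums.length : Int))))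
          else min_)
        1000

def calculate (m : Int) (nums : List Int) : Int := calcA m.toNat nums

-- ===== PORT B =====
def calculate_alt (m : Int) (nums : List Int) : Int :=
  if m < 1 then 0  -- Python B raises ValueError here; outside Pre_calculate
  else
    let n : Int := (nums.length : Int)
    let pref := nums.foldl (fun acc x => acc ++ [PySem.List.pyGetD acc (-1) 0 + x]) [0]
    if m == 1 then PySem.List.pyGetD pref n 0
    else if m > n then 1000
    else
      let dp := (PySem.List.pyRange 2 (m+1) 1).foldl (fun dp k =>
          (PySem.List.pyRange 0 (n+1) 1).foldl (fun new p =>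
            new ++ [ (PySem.List.pyRange (k-1) p 1).foldl (fun best i =>
                let cand := max (PySem.List.pyGetD dp i 0)
                                (PySem.List.pyGetD pref p 0 - PySem.List.pyGetD pref i 0)
                if cand < best then cand else best) 1000 ]) []) pref
      PySem.List.pyGetD dp n 0

-- ===== PRECONDITION & SPEC =====
-- Pre_ excludes exactly m <= 0, where both Pythons raise (A: RecursionError, B: ValueError).
def Pre_calculate (m : Int) (nums : List Int) : Prop := 1 ≤ m
instance (m : Int) (nums : List Int) : Decidable (Pre_calculate m nums) := by unfold Pre_calculate; infer_instance
def pvWitness_calculate : Int × List Int := (2, [7, 2, 5, 10, 8])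

def Spec_calculate (m : Int) (nums : List Int) (out : Int) : Prop := out = calculate_alt m nums
instance (m : Int) (nums : List Int) (out : Int) : Decidable (Spec_calculate m nums out) := by unfold Spec_calculate; infer_instance

-- ===== CLAIM (what is proved, stated in full; the proofs are below) =====
def Claim_equal_calculate : Prop := ∀ (m : Int) (nums : List Int), Dom_calculate m nums → Pre_calculate m nums → Spec_calculate m nums (calculate m nums)

-- ===== LEMMAS AND PROOFS =====

-- the common mathematical shape of both programs: f nums k p = calculate(k, nums[:p])
def fDP (nums : List Int) : Nat → Nat → Int
  | 0, _ => 1000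
  | 1, p => (nums.take p).sum
  | (k+2), p =>
      (PySem.List.pyRange ((k : Int) + 1) (p : Int) 1).foldl
        (fun mn i =>
          let c := max (fDP nums (k+1) i.toNat)
                       ((nums.take p).sum - (nums.take i.toNat).sum)
          if c < mn then c else mn)
        1000

theorem sumA_eq_sum (xs : List Int) : sumA xs = xs.sum := by
  simpa [sumA] using PySem.List.foldl_add (g := fun x => x) (l := xs) (a := 0)

-- A's recursion on a prefix computes fDP
theorem calcA_take : ∀ (k : Nat) (nums : List Int) (p : Nat), p ≤ nums.length →
    calcA k (nums.take p) = fDP nums k p := by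
  intro k
  induction k using Nat.strong_induction_on with
  | _ k ih =>
    match k with
    | 0 => intro nums p hp; rfl
    | 1 => intro nums p hp; simp [calcA, fDP, sumA_eq_sum]
    | (k+2) =>
      intro nums p hp
      rw [calcA, fDP]
      simp only [List.length_take, Nat.min_eq_left hp]
      apply PySem.List.foldl_congr_mem
      intro acc i hi
      rw [PySem.List.mem_pyRange_one] at hi
      obtain ⟨h1, h2⟩ := hi
      have h0 : (0:Int) ≤ i := by omega
      have hj : i.toNat < p := by omega
      have hip : (i.toNat : Int) = i := Int.toNat_of_nonneg h0
      rw [PySem.List.slice_zero_start, PySem.List.slice_to _ h0,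
          PySem.List.slice_toNat _ h0 (by positivity)]
      rw [List.take_take, Nat.min_eq_left (le_of_lt hj)]
      have hdlen : ((nums.take p).drop i.toNat).length = p - i.toNat := by
        simp [List.length_drop, List.length_take, Nat.min_eq_left hp]
      rw [show ((p:Int).toNat = p) from by omega,
          List.take_of_length_le (le_of_eq hdlen)]
      have hsum : sumA ((nums.take p).drop i.toNat)
          = (nums.take p).sum - (nums.take i.toNat).sum := by
        have := List.sum_take_add_sum_drop (nums.take p) i.toNat
        rw [List.take_take, Nat.min_eq_left (le_of_lt hj)] at this
        rw [sumA_eq_sum]; omega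
      rw [hsum, ih (k+1) (by omega) nums i.toNat (by omega)]

-- notation for the table of prefix sums and the DP table
def prefL (nums : List Int) : List Int :=
  (List.range (nums.length + 1)).map (fun p => (nums.take p).sum)

def tbl (nums : List Int) (k : Nat) : List Int :=
  (List.range (nums.length + 1)).map (fun p => fDP nums k p)

theorem build_inv : ∀ (xs pre : List Int) (a : Int),
    xs.foldl (fun acc x => acc ++ [PySem.List.pyGetD acc (-1) 0 + x]) (pre ++ [a])
      = pre ++ List.scanl (· + ·) a xs := by
  intro xs
  induction xs with
  | nil => intro pre a; simp
  | cons x xs ih =>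
    intro pre a
    rw [List.foldl_cons, PySem.List.pyGetD_neg_one_append_singleton, List.scanl_cons,
        List.append_assoc, show [a] ++ [a + x] = [a] ++ [a + x] from rfl,
        ← List.append_assoc]
    rw [ih (pre ++ [a]) (a + x)]
    simp

theorem scanl_eq_map (xs : List Int) : ∀ c : Int,
    List.scanl (· + ·) c xs = (List.range (xs.length + 1)).map (fun p => c + (xs.take p).sum) := by
  induction xs with
  | nil => intro c; simp
  | cons x xs ih =>
    intro c
    rw [List.scanl_cons, ih (c + x)]
    conv_rhs => rw [show (x :: xs).length + 1 = xs.length + 1 + 1 from rfl,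
                    List.range_succ_eq_map, List.map_cons, List.map_map]
    simp [Function.comp_def, add_assoc]

-- B's prefix-building loop produces the table of prefix sums
theorem pref_eq_map (nums : List Int) :
    nums.foldl (fun acc x => acc ++ [PySem.List.pyGetD acc (-1) 0 + x]) [0] = prefL nums := by
  have h := build_inv nums [] 0
  simp only [List.nil_append] at h
  rw [h, scanl_eq_map]
  simp [prefL]

theorem pyGetD_prefL (nums : List Int) (i : Int) (h0 : 0 ≤ i) (hn : i.toNat ≤ nums.length) :
    PySem.List.pyGetD (prefL nums) i 0 = (nums.take i.toNat).sum := by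
  rw [show i = (i.toNat : Int) from (Int.toNat_of_nonneg h0).symm, PySem.List.pyGetD_natCast,
      prefL, PySem.List.getD_map_range _ _ _ _ (by omega)]
  rw [Int.toNat_natCast]

theorem pyGetD_tbl (nums : List Int) (k : Nat) (i : Int) (h0 : 0 ≤ i) (hn : i.toNat ≤ nums.length) :
    PySem.List.pyGetD (tbl nums k) i 0 = fDP nums k i.toNat := by
  rw [show i = (i.toNat : Int) from (Int.toNat_of_nonneg h0).symm, PySem.List.pyGetD_natCast,
      tbl, PySem.List.getD_map_range _ _ _ _ (by omega)]
  rw [Int.toNat_natCast]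

-- one cell of B's inner loop is a value of fDP
theorem inner_cell (nums : List Int) (k : Nat) (p : Int) (hp0 : 0 ≤ p)
    (hpn : p.toNat ≤ nums.length) :
    (PySem.List.pyRange ((k : Int) + 2 - 1) p).foldl (fun best i =>
        let cand := max (PySem.List.pyGetD (tbl nums (k + 1)) i 0)
                        (PySem.List.pyGetD (prefL nums) p 0 - PySem.List.pyGetD (prefL nums) i 0)
        if cand < best then cand else best) 1000
      = fDP nums (k + 2) p.toNat := by
  rw [fDP, show ((p.toNat : Int)) = p from Int.toNat_of_nonneg hp0,
      show ((k : Int) + 2 - 1) = (k : Int) + 1 from by ring]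
  apply PySem.List.foldl_congr_mem
  intro acc i hi
  rw [PySem.List.mem_pyRange_one] at hi
  obtain ⟨h1, h2⟩ := hi
  have h0 : (0:Int) ≤ i := by omega
  rw [pyGetD_tbl nums (k+1) i h0 (by omega), pyGetD_prefL nums p hp0 hpn,
      pyGetD_prefL nums i h0 (by omega)]

-- one iteration of B's outer loop maps the level-(k+1) table to the level-(k+2) table
theorem row_eq (nums : List Int) (k : Nat) :
    (PySem.List.pyRange 0 ((nums.length : Int) + 1)).foldl (fun new p =>
        new ++ [ (PySem.List.pyRange ((k : Int) + 2 - 1) p).foldl (fun best i =>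
            let cand := max (PySem.List.pyGetD (tbl nums (k + 1)) i 0)
                            (PySem.List.pyGetD (prefL nums) p 0 - PySem.List.pyGetD (prefL nums) i 0)
            if cand < best then cand else best) 1000 ]) []
      = tbl nums (k + 2) := by
  rw [PySem.List.foldl_append_singleton_eq_map, List.nil_append,
      show ((nums.length : Int) + 1) = ((nums.length + 1 : Nat) : Int) from by push_cast; ring,
      PySem.List.pyRange_zero_natCast, List.map_map, tbl]
  apply List.map_congr_left
  intro p hp
  rw [List.mem_range] at hp
  have := inner_cell nums k (p : Int) (by omega) (by simp; omega)
  simpa using this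

-- B's outer loop up to t computes the level-t table
theorem outer_inv (nums : List Int) : ∀ (t : Nat), 1 ≤ t →
    (PySem.List.pyRange 2 ((t : Int) + 1)).foldl (fun dp k =>
        (PySem.List.pyRange 0 ((nums.length : Int) + 1)).foldl (fun new p =>
          new ++ [ (PySem.List.pyRange (k - 1) p).foldl (fun best i =>
              let cand := max (PySem.List.pyGetD dp i 0)
                              (PySem.List.pyGetD (prefL nums) p 0 - PySem.List.pyGetD (prefL nums) i 0)
              if cand < best then cand else best) 1000 ]) []) (prefL nums)
      = tbl nums t := by
  intro t
  induction t with
  | zero => omega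
  | succ s ih =>
    intro _
    by_cases hs : 1 ≤ s
    · rw [show ((s + 1 : Nat) : Int) + 1 = (((s : Int) + 1) + 1) from by push_cast; ring]
      conv_lhs => rw [PySem.List.pyRange_one_succ_right (a := 2) (b := (s : Int) + 1) (by omega)]
      rw [List.foldl_append, ih hs]
      obtain ⟨j, rfl⟩ : ∃ j, s = j + 1 := ⟨s - 1, by omega⟩
      rw [List.foldl_cons, List.foldl_nil,
          show ((j + 1 : Nat) : Int) + 1 - 1 = (j : Int) + 2 - 1 from by push_cast; ring]
      exact row_eq nums j
    · obtain rfl : s = 0 := by omega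
      rw [show ((0 + 1 : Nat) : Int) + 1 = (2 : Int) from by norm_num,
          PySem.List.pyRange_one_eq_nil (a := 2) (b := 2) le_rfl, List.foldl_nil, tbl, prefL]
      apply List.map_congr_left
      intro p _
      rfl

theorem calc_eq (m : Int) (nums : List Int) (hm : 1 ≤ m) :
    calculate m nums = calculate_alt m nums := by
  have hA : calculate m nums = fDP nums m.toNat nums.length := by
    have h := calcA_take m.toNat nums nums.length le_rfl
    rw [List.take_length] at h
    exact h
  rw [hA, calculate_alt, if_neg (by omega)]
  simp only [pref_eq_map]
  by_cases h1 : m = 1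
  · subst h1
    rw [if_pos (by rfl)]
    rw [pyGetD_prefL nums _ (by omega) (by omega)]
    simp [fDP]
  · rw [if_neg (by simpa using h1)]
    have hm2 : 2 ≤ m := by omega
    by_cases hbig : m > (nums.length : Int)
    · rw [if_pos hbig]
      obtain ⟨j, hj⟩ : ∃ j, m.toNat = j + 2 := ⟨m.toNat - 2, by omega⟩
      rw [hj, fDP, PySem.List.pyRange_one_eq_nil (by omega), List.foldl_nil]
    · rw [if_neg hbig]
      have houter := outer_inv nums m.toNat (by omega)
      rw [show ((m.toNat : Nat) : Int) + 1 = m + 1 from by omega] at houter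
      rw [houter, pyGetD_tbl nums m.toNat _ (by omega) (by omega), Int.toNat_natCast]

-- ===== VERDICT (by name: the statement is the Claim_ definition above) =====
theorem calculate_spec : Claim_equal_calculate := by
  intro m nums _ hpre
  exact calc_eq m nums hpre
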